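-- pv_equiv track=rewrite | github.com/bluewatersql/twinklr | packages/twinklr/core/audio/sections.py | generate_section_ids
-- ===== SOURCE A (Python) =====
-- from collections import Counter
-- from typing import Any
--
-- def generate_section_ids(sections: list[dict[str, Any]]) -> list[str]:
--     """Generate canonical section IDs using per-type counters.
--
--     Produces stable, deterministic IDs that match the convention used by
--     the audio profile LLM (per-type counters, 1-based). Singleton section
--     types omit the counter suffix for readability.
--
--     Args:
--         sections: List of raw section dicts, each containing a "label" or
--             "type" key identifying the section type (e.g., "intro", "chorus").
--
--     Returns:
--         List of section IDs in the same order as input sections.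
--
--     Examples:
--         >>> sections = [
--         ...     {"label": "intro"},
--         ...     {"label": "chorus"},
--         ...     {"label": "verse"},
--         ...     {"label": "chorus"},
--         ...     {"label": "outro"},
--         ... ]
--         >>> generate_section_ids(sections)
--         ['intro', 'chorus_1', 'verse', 'chorus_2', 'outro']
--     """
--     # Count total occurrences of each type
--     labels = [_extract_label(s) for s in sections]
--     totals = Counter(labels)
--
--     # Generate IDs with per-type counters
--     type_counter: dict[str, int] = {}
--     ids: list[str] = []
--     for label in labels:
--         type_counter[label] = type_counter.get(label, 0) + 1
--         if totals[label] == 1: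
--             # Singleton — no suffix
--             ids.append(label)
--         else:
--             # Multi-occurrence — 1-based counter suffix
--             ids.append(f"{label}_{type_counter[label]}")
--
--     return ids
--
-- def _extract_label(section: dict[str, Any]) -> str:
--     """Extract section type label from raw section dict.
--
--     Handles both 'label' (structure.sections) and 'type' (flat sections) keys.
--
--     Args:
--         section: Raw section dict.
--
--     Returns:
--         Section type label string.
--     """
--     return str(section.get("label", section.get("type", "unknown")))
-- ===== SOURCE B (Python) =====
-- def _extract_label(section):
--     """Extract section type label from raw section dict."""
--     return str(section.get("label", section.get("type", "unknown")))
--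
--
-- def generate_section_ids(sections):
--     """Group-and-place: collect the positions of each label, start from a
--     copy of the labels (singletons are already correct), then for each
--     multi-occurrence group write label_<n> at its recorded positions."""
--     labels = [_extract_label(s) for s in sections]
--     positions = {}
--     for i, lab in enumerate(labels):
--         positions.setdefault(lab, []).append(i)
--     ids = labels[:]
--     for lab, idxs in positions.items():
--         if len(idxs) > 1:
--             for n, i in enumerate(idxs, 1):
--                 ids[i] = f"{lab}_{n}"
--     return ids
-- ===== Notes on version B (the rewrite author's own statement) =====
-- stated objective: alternative
-- what changed: Replaces A's single forward pass with a Counter and a running per-type counter dict by a group-and-place scheme: first group the positions of each label into a dict of index lists, start the output as a copy of the labels (so singletons need no work), then for each multi-occurrence group write label_<n> directly at its recorded positions.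
import Mathlib
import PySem

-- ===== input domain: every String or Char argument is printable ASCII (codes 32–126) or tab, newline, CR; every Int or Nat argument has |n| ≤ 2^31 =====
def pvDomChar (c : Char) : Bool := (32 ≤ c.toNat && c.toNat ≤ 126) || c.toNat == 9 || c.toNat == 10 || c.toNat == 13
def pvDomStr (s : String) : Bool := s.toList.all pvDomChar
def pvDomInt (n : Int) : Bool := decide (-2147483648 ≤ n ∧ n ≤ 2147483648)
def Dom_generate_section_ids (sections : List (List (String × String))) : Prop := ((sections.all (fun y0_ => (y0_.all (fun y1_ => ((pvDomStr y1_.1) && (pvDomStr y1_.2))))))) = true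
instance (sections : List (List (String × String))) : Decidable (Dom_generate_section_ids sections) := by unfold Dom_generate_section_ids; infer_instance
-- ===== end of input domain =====

-- B replaces A's one-pass Counter + running per-type counter with a group-and-place
-- scheme (positions grouped per label, then suffixed IDs written back by index); alternative decomposition, not faster.


-- ===== PORT A =====
-- _extract_label: section.get("label", section.get("type", "unknown")); str() on a str value is the identity
def pvExtractLabel (s : List (String × String)) : String :=
  match (PySem.Dict.mk s).get? "label" with
  | some v => v
  | none =>
    match (PySem.Dict.mk s).get? "type" with
    | some v => v
    | none => "unknown"

def generate_section_ids (sections : List (List (String × String))) : List String :=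
  let labels := sections.map pvExtractLabel
  let totals := PySem.Dict.counter labels
  (labels.foldl
    (fun (st : PySem.Dict String Int × List String) label =>
      let tc := st.1.insert label (st.1.getD label 0 + 1)
      if totals.getD label 0 = 1 then (tc, st.2 ++ [label])
      else (tc, st.2 ++ [label ++ "_" ++ PySem.Int.toStr (tc.getD label 0)]))
    (PySem.Dict.empty, [])).2

-- ===== PORT B =====
-- ids[i] = v: every index written comes from enumerate(labels), hence 0 ≤ i < len(ids), where List.set on i.toNat is exact
def pvSetAt (xs : List String) (i : Int) (v : String) : List String := xs.set i.toNat v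

def generate_section_ids_alt (sections : List (List (String × String))) : List String :=
  let labels := sections.map pvExtractLabel
  let positions := (PySem.List.enumerate labels).foldl
    (fun (d : PySem.Dict String (List Int)) p => d.modify p.2 [] (· ++ [p.1]))
    PySem.Dict.empty
  positions.items.foldl
    (fun (ids : List String) g =>
      if 1 < g.2.length then
        (PySem.List.enumerate g.2 1).foldl
          (fun ids q => pvSetAt ids q.2 (g.1 ++ "_" ++ PySem.Int.toStr q.1)) ids
      else ids)
    labels

-- ===== PRECONDITION & SPEC =====
def Spec_generate_section_ids (sections : List (List (String × String))) (out : List String) : Prop := out = generate_section_ids_alt sections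
instance (sections : List (List (String × String))) (out : List String) : Decidable (Spec_generate_section_ids sections out) := by unfold Spec_generate_section_ids; infer_instance

-- ===== CLAIM (what is proved, stated in full; the proofs are below) =====
def Claim_equal_generate_section_ids : Prop := ∀ (sections : List (List (String × String))), Dom_generate_section_ids sections → Spec_generate_section_ids sections (generate_section_ids sections)

-- ===== LEMMAS AND PROOFS =====

-- canonical form both ports are reduced to: the ID at index i with label `lab`
def pvCanon (L : List String) : Nat → List String → List String
  | _, [] => []
  | i, lab :: rest =>
    (if L.count lab = 1 then lab
     else lab ++ "_" ++ PySem.Int.toStr (((L.take i).count lab : Int) + 1)) :: pvCanon L (i+1) rest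

lemma pvCanon_length (L : List String) :
    ∀ (rest : List String) (i : Nat), (pvCanon L i rest).length = rest.length := by
  intro rest
  induction rest with
  | nil => intro i; rfl
  | cons lab rest ih => intro i; simp [pvCanon, ih (i+1)]

lemma pvCanon_getElem? (L : List String) :
    ∀ (rest : List String) (i j : Nat),
      (pvCanon L i rest)[j]? =
        rest[j]?.map (fun lab =>
          if L.count lab = 1 then lab
          else lab ++ "_" ++ PySem.Int.toStr (((L.take (i + j)).count lab : Int) + 1)) := by
  intro rest
  induction rest with
  | nil => intro i j; simp [pvCanon]
  | cons lab rest ih =>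
    intro i j
    cases j with
    | zero => simp [pvCanon]
    | succ j =>
      have h : i + 1 + j = i + (j + 1) := by omega
      simp [pvCanon, ih (i + 1) j, h]

lemma pvA_eq_canon (L : List String) :
    ∀ (rest : List String) (i : Nat) (d : PySem.Dict String Int) (out : List String),
      (∀ x, d.getD x 0 = ((L.take i).count x : Int)) →
      L.drop i = rest →
      (rest.foldl
        (fun (st : PySem.Dict String Int × List String) label =>
          let tc := st.1.insert label (st.1.getD label 0 + 1)
          if (PySem.Dict.counter L).getD label 0 = 1 then (tc, st.2 ++ [label])
          else (tc, st.2 ++ [label ++ "_" ++ PySem.Int.toStr (tc.getD label 0)]))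
        (d, out)).2
      = out ++ pvCanon L i rest := by
  intro rest
  induction rest with
  | nil => intro i d out _ _; simp [pvCanon]
  | cons lab rest ih =>
    intro i d out hd hdrop
    have hgetElem : L[i]? = some lab := by
      have h : (L.drop i)[0]? = some lab := by rw [hdrop]; rfl
      simpa using h
    have htake : L.take (i + 1) = L.take i ++ [lab] := by
      rw [List.take_add_one, hgetElem]; rfl
    have hdrop' : L.drop (i + 1) = rest := by
      have : L.drop (i + 1) = (L.drop i).tail := by
        rw [← List.drop_drop, hdrop]; rfl
      simpa [hdrop] using this
    have hd' : ∀ x, (d.insert lab (d.getD lab 0 + 1)).getD x 0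
        = ((L.take (i + 1)).count x : Int) := by
      intro x
      rw [PySem.Dict.getD_insert, htake]
      by_cases hx : x = lab
      · subst hx
        simp [hd, List.count_append]
      · simp [hx, hd, List.count_append, Ne.symm hx]
    simp only [List.foldl_cons]
    rw [PySem.Dict.getD_counter]
    by_cases hc : L.count lab = 1
    · have hcI : ((L.count lab : Nat) : Int) = 1 := by exact_mod_cast hc
      simp only [hcI, if_true]
      rw [ih (i + 1) _ _ hd' hdrop']
      simp [pvCanon, hc]
    · have hc' : ((L.count lab : Int) = 1) = False := by
        simp [hc]
      simp only [hc', if_false]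
      rw [ih (i + 1) _ _ hd' hdrop']
      have hval : (d.insert lab (d.getD lab 0 + 1)).getD lab 0
          = ((L.take i).count lab : Int) + 1 := by
        rw [PySem.Dict.getD_insert_self, hd]
      simp [pvCanon, hc, hval]

-- the per-label position list B's grouping dict stores (start offset s generalises the enumerate start)
def pvE (L : List String) (s : Int) (lab : String) : List Int :=
  ((PySem.List.enumerate L s).filter (fun p => p.2 == lab)).map (·.1)

lemma pvE_mem (L : List String) (s : Int) (lab : String) (x : Int) :
    x ∈ pvE L s lab ↔ ∃ (k : Nat) (_ : k < L.length), x = s + k ∧ L[k] = lab := by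
  unfold pvE
  simp only [List.mem_map, List.mem_filter, PySem.List.mem_enumerate_iff]
  constructor
  · rintro ⟨p, ⟨⟨k, hk, rfl⟩, hlab⟩, rfl⟩
    exact ⟨k, hk, rfl, by simpa using hlab⟩
  · rintro ⟨k, hk, rfl, hlab⟩
    exact ⟨(s + k, L[k]), ⟨⟨k, hk, rfl⟩, by simpa using hlab⟩, rfl⟩

lemma pvE_length (L : List String) (s : Int) (lab : String) :
    (pvE L s lab).length = L.count lab := by
  unfold pvE
  rw [List.length_map, ← List.countP_eq_length_filter]
  have h := PySem.List.map_snd_enumerate L s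
  calc (PySem.List.enumerate L s).countP (fun p => p.2 == lab)
      = ((PySem.List.enumerate L s).map (fun p => p.2)).countP (fun x => x == lab) := by
        rw [List.countP_map]; rfl
    _ = L.count lab := by rw [h, List.count]

lemma pvE_nodup (L : List String) (s : Int) (lab : String) : (pvE L s lab).Nodup := by
  unfold pvE
  have h1 : (PySem.List.enumerate L s).Pairwise (fun p q => p.1 < q.1) :=
    PySem.List.pairwise_lt_enumerate L s
  have h2 := List.Pairwise.filter (R := fun p q : Int × String => p.1 < q.1)
    (fun p => p.2 == lab) h1
  have h3 : (((PySem.List.enumerate L s).filter (fun p => p.2 == lab)).map (·.1)).Pairwise (· < ·) := by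
    rw [List.pairwise_map]; exact h2
  exact h3.imp (fun h => ne_of_lt h)

lemma pvE_index? (L : List String) :
    ∀ (j : Nat) (s : Int) (lab : String), (hj : j < L.length) → L[j] = lab →
      PySem.List.index? (pvE L s lab) (s + j) = some ((L.take j).count lab) := by
  induction L with
  | nil => intro j s lab hj _; simp at hj
  | cons x rest ih =>
    intro j s lab hj hlab
    unfold pvE
    rw [PySem.List.enumerate_cons]
    cases j with
    | zero =>
      simp only [List.getElem_cons_zero] at hlab
      subst hlab
      simp only [List.filter_cons, beq_self_eq_true, if_pos, List.map_cons]
      simpa using PySem.List.index?_cons_self (s + (0 : Nat)) ((PySem.List.enumerate rest (s+1)).filter (fun p => p.2 == x) |>.map (·.1))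
    | succ j =>
      have hj' : j < rest.length := by simpa using hj
      have hlab' : rest[j] = lab := by simpa using hlab
      have key : PySem.List.index? (pvE rest (s+1) lab) ((s+1) + j) = some ((rest.take j).count lab) :=
        ih j (s+1) lab hj' hlab'
      have hcast : s + ((j+1 : Nat) : Int) = (s+1) + (j : Nat) := by push_cast; ring
      by_cases hx : x = lab
      · subst hx
        simp only [List.filter_cons, beq_self_eq_true, if_pos, List.map_cons]
        have hne : s ≠ s + ((j+1 : Nat) : Int) := by push_cast; omega
        rw [PySem.List.index?_cons_of_ne _ hne, hcast]
        unfold pvE at key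
        rw [key]
        simp [List.take_succ_cons]
      · have hfx : ((x == lab) = false) := by simpa using hx
        simp only [List.filter_cons, hfx, Bool.false_eq_true, if_neg, not_false_iff]
        rw [hcast]
        unfold pvE at key
        rw [key]
        simp [List.take_succ_cons, hx]

lemma pvE_not_mem (L : List String) (j : Nat) (lab : String) (hj : j < L.length)
    (hlab : L[j] ≠ lab) : ((j : Nat) : Int) ∉ pvE L 0 lab := by
  rw [pvE_mem]
  rintro ⟨k, hk, hkj, hklab⟩
  have : k = j := by omega
  subst this
  exact hlab hklab

-- the inner write loop: result at j is lab_<n+p> when j sits at position p of il, untouched otherwise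
lemma pvInner (lab : String) :
    ∀ (il : List Int) (n : Int) (ids : List String),
      (∀ i ∈ il, 0 ≤ i) → il.Nodup →
      ∀ (j : Nat), j < ids.length →
        ((PySem.List.enumerate il n).foldl
          (fun ids q => pvSetAt ids q.2 (lab ++ "_" ++ PySem.Int.toStr q.1)) ids)[j]? =
        (match PySem.List.index? il ((j : Nat) : Int) with
         | some p => some (lab ++ "_" ++ PySem.Int.toStr (n + p))
         | none => ids[j]?) := by
  intro il
  induction il with
  | nil => intro n ids _ _ j hj; simp [PySem.List.enumerate_nil, PySem.List.index?]
  | cons i rest ih =>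
    intro n ids hpos hnd j hj
    have hi0 : 0 ≤ i := hpos i (List.mem_cons_self)
    rw [PySem.List.enumerate_cons]
    simp only [List.foldl_cons]
    have hlen : (pvSetAt ids i (lab ++ "_" ++ PySem.Int.toStr n)).length = ids.length := by
      simp [pvSetAt]
    have ihres := ih (n+1) (pvSetAt ids i (lab ++ "_" ++ PySem.Int.toStr n))
      (fun x hx => hpos x (List.mem_cons_of_mem _ hx)) hnd.of_cons j (by omega)
    rw [ihres]
    by_cases hij : i = ((j : Nat) : Int)
    · have hjrest : ((j : Nat) : Int) ∉ rest := by
        rw [← hij]; exact (List.nodup_cons.mp hnd).1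
      rw [(PySem.List.index?_eq_none_iff rest _).mpr hjrest]
      rw [hij, PySem.List.index?_cons_self]
      simp only [pvSetAt]
      rw [List.getElem?_set]
      simp [hj]
    · rw [PySem.List.index?_cons_of_ne rest (fun h => hij h)]
      cases hidx : PySem.List.index? rest ((j : Nat) : Int) with
      | none =>
        simp only [Option.map_none]
        simp only [pvSetAt]
        rw [List.getElem?_set]
        have : i.toNat ≠ j := by omega
        simp [this]
      | some p =>
        simp only [Option.map_some]
        have : n + 1 + (p : Int) = n + ((p + 1 : Nat) : Int) := by push_cast; ring
        rw [this]

-- the outer loop preserves length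
lemma pvInnerLen (lab : String) (il : List Int) (n : Int) (ids : List String) :
    ((PySem.List.enumerate il n).foldl
      (fun ids q => pvSetAt ids q.2 (lab ++ "_" ++ PySem.Int.toStr q.1)) ids).length = ids.length := by
  induction il generalizing n ids with
  | nil => simp [PySem.List.enumerate_nil]
  | cons i rest ih =>
    rw [PySem.List.enumerate_cons]
    simp only [List.foldl_cons]
    rw [ih]
    simp [pvSetAt]

lemma pvOuterLen (gs : List (String × List Int)) (ids : List String) :
    (gs.foldl
      (fun (ids : List String) g =>
        if 1 < g.2.length then
          (PySem.List.enumerate g.2 1).foldl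
            (fun ids q => pvSetAt ids q.2 (g.1 ++ "_" ++ PySem.Int.toStr q.1)) ids
        else ids)
      ids).length = ids.length := by
  induction gs generalizing ids with
  | nil => rfl
  | cons g gs ih =>
    simp only [List.foldl_cons]
    rw [ih]
    split
    · rw [pvInnerLen]
    · rfl

-- the outer loop: result at j is the suffixed ID once j's own label group has been processed
lemma pvOuter (L : List String) :
    ∀ (gs : List (String × List Int)) (ids : List String),
      ids.length = L.length →
      (∀ g ∈ gs, g.2 = pvE L 0 g.1) →
      ∀ (j : Nat) (hj : j < L.length),
        (gs.foldl
          (fun (ids : List String) g =>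
            if 1 < g.2.length then
              (PySem.List.enumerate g.2 1).foldl
                (fun ids q => pvSetAt ids q.2 (g.1 ++ "_" ++ PySem.Int.toStr q.1)) ids
            else ids)
          ids)[j]? =
        if L[j] ∈ gs.map (·.1) ∧ L.count L[j] ≠ 1 then
          some (L[j] ++ "_" ++ PySem.Int.toStr (((L.take j).count L[j] : Int) + 1))
        else ids[j]? := by
  intro gs
  induction gs with
  | nil => intro ids _ _ j hj; simp
  | cons g gs ih =>
    intro ids hlen hE j hj
    obtain ⟨lab, il⟩ := g
    have hil : il = pvE L 0 lab := hE (lab, il) (List.mem_cons_self)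
    have hcount : il.length = L.count lab := by rw [hil, pvE_length]
    have hE' : ∀ g ∈ gs, g.2 = pvE L 0 g.1 := fun g hg => hE g (List.mem_cons_of_mem _ hg)
    simp only [List.foldl_cons, List.map_cons]
    by_cases hbig : 1 < il.length
    · rw [if_pos hbig]
      have hlen' := pvInnerLen lab il 1 ids
      have ihres := ih _ (by rw [hlen', hlen]) hE' j hj
      rw [ihres]
      by_cases hin : L[j] ∈ gs.map (·.1) ∧ L.count L[j] ≠ 1
      · rw [if_pos hin, if_pos ⟨List.mem_cons_of_mem _ hin.1, hin.2⟩]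
      · rw [if_neg hin]
        have hwrite := pvInner lab il 1 ids
          (by
            intro i hi
            rw [hil] at hi
            rcases (pvE_mem L 0 lab i).mp hi with ⟨k, hk, rfl, _⟩
            omega)
          (by rw [hil]; exact pvE_nodup L 0 lab) j (by omega)
        rw [hwrite]
        by_cases heq : L[j] = lab
        · have hidx : PySem.List.index? il ((j : Nat) : Int) = some ((L.take j).count lab) := by
            rw [hil]
            have := pvE_index? L j 0 lab hj heq
            simpa using this
          rw [hidx]
          have hc1 : L.count L[j] ≠ 1 := by rw [heq]; omega
          rw [if_pos ⟨by simp [heq], hc1⟩]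
          rw [heq]
          simp [Int.add_comm]
        · have hidx : PySem.List.index? il ((j : Nat) : Int) = none := by
            rw [hil]
            exact (PySem.List.index?_eq_none_iff _ _).mpr (pvE_not_mem L j lab hj heq)
          rw [hidx]
          have hcond : ¬ (L[j] ∈ lab :: gs.map (·.1) ∧ L.count L[j] ≠ 1) := by
            rintro ⟨hm, hc⟩
            rcases List.mem_cons.mp hm with h | h
            · exact heq h
            · exact hin ⟨h, hc⟩
          rw [if_neg hcond]
    · rw [if_neg hbig]
      have ihres := ih ids hlen hE' j hj
      rw [ihres]
      by_cases hin : L[j] ∈ gs.map (·.1) ∧ L.count L[j] ≠ 1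
      · rw [if_pos hin, if_pos ⟨List.mem_cons_of_mem _ hin.1, hin.2⟩]
      · rw [if_neg hin]
        have hcond : ¬ (L[j] ∈ lab :: gs.map (·.1) ∧ L.count L[j] ≠ 1) := by
          rintro ⟨hm, hc⟩
          rcases List.mem_cons.mp hm with h | h
          · have hge : 1 ≤ L.count lab := by
              rw [← h]
              exact List.one_le_count_iff.mpr (List.getElem_mem hj)
            rw [h] at hc
            omega
          · exact hin ⟨h, hc⟩
        rw [if_neg hcond]

-- ===== VERDICT (by name: the statement is the Claim_ definition above) =====
theorem generate_section_ids_spec : Claim_equal_generate_section_ids := by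
  intro sections _
  unfold Spec_generate_section_ids generate_section_ids generate_section_ids_alt
  simp only []
  set L := sections.map pvExtractLabel with hL
  set D := (PySem.List.enumerate L).foldl
    (fun (d : PySem.Dict String (List Int)) p => d.modify p.2 [] (· ++ [p.1]))
    PySem.Dict.empty with hD
  have hA := pvA_eq_canon L L 0 PySem.Dict.empty []
    (by intro x; simp [PySem.Dict.getD_empty]) (by simp)
  rw [hA, List.nil_append]
  have hgetD : ∀ lab, D.getD lab [] = pvE L 0 lab := by
    intro lab
    have h := PySem.Dict.getD_foldl_modify_append
      ((PySem.List.enumerate L).map (fun p => (p.2, p.1))) (PySem.Dict.empty (κ := String) (ν := List Int)) lab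
    rw [List.foldl_map] at h
    rw [hD]
    rw [show ((PySem.List.enumerate L).foldl
        (fun (d : PySem.Dict String (List Int)) p => d.modify p.2 [] (· ++ [p.1]))
        PySem.Dict.empty) = ((PySem.List.enumerate L).foldl
        (fun (d : PySem.Dict String (List Int)) p => d.modify p.2 [] (fun x => x ++ [p.1]))
        PySem.Dict.empty) from rfl]
    rw [h]
    rw [List.filter_map, List.map_map]
    simp only [PySem.Dict.getD_empty, List.nil_append]
    rfl
  have hnodup : D.keys.Nodup := by
    rw [hD]
    exact PySem.Dict.nodup_keys_foldl_modify_key (PySem.List.enumerate L)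
      (fun p => p.2) [] (fun _ p l => l ++ [p.1]) PySem.Dict.empty (by simp)
  have hkeys : D.keys = PySem.Set.ofList L := by
    have h := PySem.Dict.keys_foldl_modify_key (PySem.List.enumerate L)
      (fun p => p.2) ([] : List Int) (fun _ p l => l ++ [p.1]) PySem.Dict.empty
    simp only [PySem.Dict.keys_empty, PySem.Set.update_nil_left,
      PySem.List.map_snd_enumerate] at h
    rw [hD]
    exact h
  have hE : ∀ g ∈ D.items, g.2 = pvE L 0 g.1 := by
    intro g hg
    rw [PySem.Dict.items_eq_map_keys D hnodup []] at hg
    rcases List.mem_map.mp hg with ⟨k, _, rfl⟩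
    exact hgetD k
  have hfst : D.items.map (·.1) = D.keys := rfl
  apply List.ext_getElem?
  intro j
  by_cases hj : j < L.length
  · rw [pvOuter L D.items L rfl hE j hj, pvCanon_getElem? L L 0 j]
    have hmem : L[j] ∈ D.items.map (·.1) := by
      rw [hfst, hkeys]
      exact (PySem.Set.mem_ofList (y := L[j]) (xs := L)).mpr (List.getElem_mem hj)
    rw [List.getElem?_eq_getElem hj]
    by_cases hc : L.count L[j] = 1
    · rw [if_neg (by simp [hc])]
      simp [hc]
    · rw [if_pos ⟨hmem, hc⟩]
      simp [hc]
  · rw [List.getElem?_eq_none (by rw [pvCanon_length]; omega),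
      List.getElem?_eq_none (by rw [pvOuterLen]; omega)]
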